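-- pv_equiv track=rewrite | github.com/dassantoss/holbertonschool-machine_learning | math/linear_algebra/102-squashed_like_sardines.py | cat_matrices
-- ===== SOURCE A (Python) =====
-- def cat_matrices(mat1, mat2, axis=0):
--     """
--     Concatenates two matrices along a specified axis.
--
--     Args:
--     - mat1 (list of lists): The first matrix as a nested list.
--     - mat2 (list of lists): The second matrix as a nested list.
--     - axis (int): The axis along which to concatenate the matrices.
--
--     Returns:
--     - list of lists: The concatenated matrix if the dimensions are compatible.
--     - None: If the matrices cannot be concatenated along the specified axis.
--     """
--
--     def recursive_concat(a, b, depth):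
--         """
--         Recursively concatenates sub-lists when reaching the specified axis.
--         """
--         if depth == axis:
--             return a + b
--         elif depth < axis and isinstance(a, list) and isinstance(b, list):
--             if len(a) != len(b):
--                 return None
--             return [recursive_concat(a_sub, b_sub, depth + 1)
--                     for a_sub, b_sub in zip(a, b)]
--         elif depth > axis:
--             return [recursive_concat(a, b, depth)]
--         else:
--             return None
--
--     def can_concatenate(a, b, depth):
--         """
--         Checks if two sub-lists can be concatenated at the given depth.
--         Ensures all higher dimensions match unless at the concatenation axis.
--         """
--         if depth < axis:
--             if not (isinstance(a, list) and isinstance(b, list)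
--                     and len(a) == len(b)):
--                 return False
--             return all(can_concatenate(a_sub, b_sub, depth + 1)
--                        for a_sub, b_sub in zip(a, b))
--         return True
--
--     # Start the concatenation if matrices are compatible
--     if can_concatenate(mat1, mat2, 0):
--         result = recursive_concat(mat1, mat2, 0)
--         if isinstance(result[0], list):
--             return result
--         else:
--             return None
--     else:
--         return None
-- ===== SOURCE B (Python) =====
-- def cat_matrices(mat1, mat2, axis=0):
--     """Concatenate two 2-D matrices along axis 0 (stack rows) or axis 1
--     (extend rows, lengths must match); any other axis is out of range
--     for a 2-D matrix, so return None."""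
--     if axis == 0:
--         return mat1 + mat2
--     if axis == 1 and len(mat1) == len(mat2):
--         return [r1 + r2 for r1, r2 in zip(mat1, mat2)]
--     return None
-- ===== Notes on version B (the rewrite author's own statement) =====
-- stated objective: simpler
-- what changed: Replaces A's two generic depth-recursive passes (can_concatenate validator plus recursive_concat builder with a final result[0] guard) by a flat non-recursive case split on axis (0: stack rows; 1: zip and extend rows; otherwise None).
-- intended difference: On axis >= 2 with fully matching shapes (axes a 2-D matrix does not have) A's recursion bottoms out and returns the elementwise sums at axis 2, or mat1 unchanged at axis >= 3 when every row is empty, while B returns None, the intended answer for an out-of-range axis. — e.g. on cat_matrices([[1, 2]], [[3, 4]], 2): A returns some [[4, 6]], B returns none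
import Mathlib
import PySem

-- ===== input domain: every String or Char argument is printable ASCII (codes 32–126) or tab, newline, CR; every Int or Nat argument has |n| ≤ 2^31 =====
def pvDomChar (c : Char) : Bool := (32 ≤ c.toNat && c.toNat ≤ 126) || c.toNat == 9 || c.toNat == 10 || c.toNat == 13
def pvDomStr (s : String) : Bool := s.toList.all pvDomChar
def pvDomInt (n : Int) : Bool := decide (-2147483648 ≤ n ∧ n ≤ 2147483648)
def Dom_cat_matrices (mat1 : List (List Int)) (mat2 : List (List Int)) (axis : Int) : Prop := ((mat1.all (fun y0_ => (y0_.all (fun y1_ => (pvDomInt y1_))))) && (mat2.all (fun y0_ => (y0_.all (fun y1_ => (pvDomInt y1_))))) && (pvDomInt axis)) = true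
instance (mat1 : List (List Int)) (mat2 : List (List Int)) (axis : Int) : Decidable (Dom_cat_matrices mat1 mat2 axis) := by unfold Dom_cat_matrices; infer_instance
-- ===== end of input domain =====

-- B rewrites A's two generic recursive passes (validate, then rebuild) as a flat
-- non-recursive case split on the axis of a 2-D matrix; on axes a 2-D matrix does
-- not have, B returns None where A's bottomed-out recursion returns an accidental
-- value (see D_ below).  Equivalence is about the return value only (no mutation).

-- ===== PORT A =====
-- Python's list comprehension [recursive_concat(x, y, d+1) for x, y in zip(a, b)]
-- over the Option-valued recursion; a None sub-result poisons the whole list.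
-- (In Python the list would CONTAIN None; the top level only inspects the result
-- where the can_concatenate gate makes inner Nones impossible, so this is exact.)
def pvZipRec {α β γ : Type} (f : α → β → Option γ) : List α → List β → Option (List γ)
  | a :: as, b :: bs =>
      match f a b, pvZipRec f as bs with
      | some c, some cs => some (c :: cs)
      | _, _ => none
  | _, _ => some []

-- recursive_concat at depth 2 (the ints): depth == axis → a + b (int addition);
-- depth < axis → ints are not lists, fall through to the final else → None
def pvRC2 (axis : Int) (a b : Int) : Option Int :=
  if axis = 2 then some (a + b) else none

-- recursive_concat at depth 1 (the rows)
def pvRC1 (axis : Int) (a b : List Int) : Option (List Int) :=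
  if axis = 1 then some (a ++ b)
  else if 1 < axis then
    if a.length ≠ b.length then none else pvZipRec (pvRC2 axis) a b
  else none  -- depth 1 is only entered when 0 < axis, so this branch is never taken

-- recursive_concat at depth 0 (the matrices)
def pvRC0 (axis : Int) (a b : List (List Int)) : Option (List (List Int)) :=
  if axis = 0 then some (a ++ b)
  else if 0 < axis then
    if a.length ≠ b.length then none else pvZipRec (pvRC1 axis) a b
  else none  -- axis < 0: Python recurses without bound (RecursionError); outside Pre_

-- can_concatenate at depths 2 / 1 / 0
def pvCC2 (axis : Int) (_a _b : Int) : Bool :=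
  !decide (2 < axis)  -- depth < axis: ints are not lists → False; otherwise True

def pvCC1 (axis : Int) (a b : List Int) : Bool :=
  if 1 < axis then a.length == b.length && (a.zip b).all (fun p => pvCC2 axis p.1 p.2)
  else true

def pvCC0 (axis : Int) (a b : List (List Int)) : Bool :=
  if 0 < axis then a.length == b.length && (a.zip b).all (fun p => pvCC1 axis p.1 p.2)
  else true

def cat_matrices (mat1 : List (List Int)) (mat2 : List (List Int)) (axis : Int) : Option (List (List Int)) :=
  if pvCC0 axis mat1 mat2 then
    match pvRC0 axis mat1 mat2 with
    | some (r :: rs) => some (r :: rs)  -- isinstance(result[0], list) holds throughout this typed domain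
    | some [] => none                   -- Python: result[0] raises IndexError; excluded by Pre_
    | none => none                      -- unreachable once the gate above has passed
  else none

-- ===== PORT B =====
def cat_matrices_alt (mat1 : List (List Int)) (mat2 : List (List Int)) (axis : Int) : Option (List (List Int)) :=
  if axis = 0 then some (mat1 ++ mat2)
  else if axis = 1 ∧ mat1.length = mat2.length then
    some ((mat1.zip mat2).map (fun p => p.1 ++ p.2))
  else none

-- ===== PRECONDITION & SPEC =====
-- Pre_ excludes exactly the inputs on which A raises: axis < 0 (unbounded
-- recursion, RecursionError) and mat1 = mat2 = [] (result[0], IndexError).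
def Pre_cat_matrices (mat1 : List (List Int)) (mat2 : List (List Int)) (axis : Int) : Prop :=
  0 ≤ axis ∧ ¬(mat1 = [] ∧ mat2 = [])
instance (mat1 : List (List Int)) (mat2 : List (List Int)) (axis : Int) : Decidable (Pre_cat_matrices mat1 mat2 axis) := by unfold Pre_cat_matrices; infer_instance

def pvWitness_cat_matrices : List (List Int) × List (List Int) × Int := ([[1, 2]], [[3, 4]], 0)

-- On axis ≥ 2 with fully matching shapes — axes a 2-D matrix does not have — A's
-- recursion bottoms out and returns the elementwise SUMS at axis 2 (int a + b),
-- or mat1 unchanged at axis ≥ 3 when every row is empty; B returns None, the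
-- intended answer for an out-of-range concatenation axis.
def D_cat_matrices (mat1 : List (List Int)) (mat2 : List (List Int)) (axis : Int) : Prop :=
  mat1.length = mat2.length ∧ (∀ p ∈ mat1.zip mat2, p.1.length = p.2.length) ∧
    (axis = 2 ∨ (3 ≤ axis ∧ ∀ r ∈ mat1, r = []))
instance (mat1 : List (List Int)) (mat2 : List (List Int)) (axis : Int) : Decidable (D_cat_matrices mat1 mat2 axis) := by unfold D_cat_matrices; infer_instance

def Spec_cat_matrices (mat1 : List (List Int)) (mat2 : List (List Int)) (axis : Int) (out : Option (List (List Int))) : Prop := ¬ D_cat_matrices mat1 mat2 axis → out = cat_matrices_alt mat1 mat2 axis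
instance (mat1 : List (List Int)) (mat2 : List (List Int)) (axis : Int) (out : Option (List (List Int))) : Decidable (Spec_cat_matrices mat1 mat2 axis out) := by unfold Spec_cat_matrices; infer_instance

def pvDiffWitness_cat_matrices : List (List Int) × List (List Int) × Int := ([[1, 2]], [[3, 4]], 2)
def pvDiffWitnessOut_cat_matrices : (Option (List (List Int))) × (Option (List (List Int))) := (some [[4, 6]], none)

-- ===== CLAIM (what is proved, stated in full; the proofs are below) =====
def Claim_unchanged_cat_matrices : Prop := ∀ (mat1 : List (List Int)) (mat2 : List (List Int)) (axis : Int), Dom_cat_matrices mat1 mat2 axis → Pre_cat_matrices mat1 mat2 axis → Spec_cat_matrices mat1 mat2 axis (cat_matrices mat1 mat2 axis)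
def Claim_changed_cat_matrices : Prop := Dom_cat_matrices (pvDiffWitness_cat_matrices.1) (pvDiffWitness_cat_matrices.2.1) (pvDiffWitness_cat_matrices.2.2) ∧ Pre_cat_matrices (pvDiffWitness_cat_matrices.1) (pvDiffWitness_cat_matrices.2.1) (pvDiffWitness_cat_matrices.2.2) ∧ D_cat_matrices (pvDiffWitness_cat_matrices.1) (pvDiffWitness_cat_matrices.2.1) (pvDiffWitness_cat_matrices.2.2) ∧ cat_matrices (pvDiffWitness_cat_matrices.1) (pvDiffWitness_cat_matrices.2.1) (pvDiffWitness_cat_matrices.2.2) = pvDiffWitnessOut_cat_matrices.1 ∧ cat_matrices_alt (pvDiffWitness_cat_matrices.1) (pvDiffWitness_cat_matrices.2.1) (pvDiffWitness_cat_matrices.2.2) = pvDiffWitnessOut_cat_matrices.2 ∧ pvDiffWitnessOut_cat_matrices.1 ≠ pvDiffWitnessOut_cat_matrices.2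
def Claim_exact_cat_matrices : Prop := ∀ (mat1 : List (List Int)) (mat2 : List (List Int)) (axis : Int), Dom_cat_matrices mat1 mat2 axis → Pre_cat_matrices mat1 mat2 axis → D_cat_matrices mat1 mat2 axis → cat_matrices mat1 mat2 axis ≠ cat_matrices_alt mat1 mat2 axis

-- ===== LEMMAS AND PROOFS =====

-- when f returns some (g …) on every zipped pair, the comprehension is total
theorem pvZipRec_total_mem {α β γ : Type} (f : α → β → Option γ) (g : α → β → γ) :
    ∀ (a : List α) (b : List β), (∀ p ∈ a.zip b, f p.1 p.2 = some (g p.1 p.2)) →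
      pvZipRec f a b = some ((a.zip b).map (fun p => g p.1 p.2))
  | [], b, _ => by cases b <;> simp [pvZipRec]
  | x :: xs, [], _ => by simp [pvZipRec]
  | x :: xs, y :: ys, h => by
      have hx := h (x, y) (by simp)
      have ih := pvZipRec_total_mem f g xs ys (fun p hp => h p (by simp [hp]))
      simp [pvZipRec, hx, ih]

theorem mem_of_mem_left_zip {α β : Type} {l1 : List α} {l2 : List β} {x : α}
    (hlen : l1.length = l2.length) (hx : x ∈ l1) : ∃ p ∈ l1.zip l2, p.1 = x := by
  obtain ⟨i, hi, rfl⟩ := List.mem_iff_getElem.mp hx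
  refine ⟨(l1.zip l2)[i]'(by simp [List.length_zip]; omega), List.getElem_mem _, ?_⟩
  simp [List.getElem_zip]

-- axis = 0
theorem catA_axis0 (m1 m2 : List (List Int)) (hne : ¬(m1 = [] ∧ m2 = [])) :
    cat_matrices m1 m2 0 = some (m1 ++ m2) := by
  have hmm : m1 ++ m2 ≠ [] := fun h =>
    hne ⟨(List.append_eq_nil_iff.mp h).1, (List.append_eq_nil_iff.mp h).2⟩
  cases h : m1 ++ m2 with
  | nil => exact absurd h hmm
  | cons r rs => simp [cat_matrices, pvCC0, pvRC0, h]

-- axis = 1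
theorem catA_axis1 (m1 m2 : List (List Int)) (hne : ¬(m1 = [] ∧ m2 = [])) :
    cat_matrices m1 m2 1 =
      if m1.length = m2.length then some ((m1.zip m2).map (fun p => p.1 ++ p.2)) else none := by
  by_cases hlen : m1.length = m2.length
  · have hrc : pvZipRec (pvRC1 1) m1 m2 = some ((m1.zip m2).map (fun p => p.1 ++ p.2)) :=
      pvZipRec_total_mem _ _ _ _ (fun p _ => by simp [pvRC1])
    have hm1 : m1 ≠ [] := by
      rintro rfl
      exact hne ⟨rfl, List.length_eq_zero_iff.mp (by simpa using hlen.symm)⟩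
    obtain ⟨x, xs, rfl⟩ := List.exists_cons_of_ne_nil hm1
    obtain ⟨y, ys, rfl⟩ := List.exists_cons_of_ne_nil
      (show m2 ≠ [] by rintro rfl; simp at hlen)
    simp [cat_matrices, pvCC0, pvCC1, pvRC0, hlen, hrc]
  · simp [cat_matrices, pvCC0, pvCC1, hlen]

-- the gate for 2 ≤ axis, read back as shape facts
theorem gate_char (axis : Int) (h2 : 2 ≤ axis) (m1 m2 : List (List Int))
    (hcc : pvCC0 axis m1 m2 = true) :
    m1.length = m2.length ∧ (∀ p ∈ m1.zip m2, p.1.length = p.2.length) ∧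
      (3 ≤ axis → ∀ r ∈ m1, r = []) := by
  rw [pvCC0, if_pos (by omega)] at hcc
  simp only [Bool.and_eq_true] at hcc
  obtain ⟨hlen, hall⟩ := hcc
  have hlen' : m1.length = m2.length := by exact_mod_cast beq_iff_eq.mp hlen
  have hall' := List.all_eq_true.mp hall
  refine ⟨hlen', ?_, ?_⟩
  · intro p hp
    have := hall' p hp
    rw [pvCC1, if_pos (by omega)] at this
    simp only [Bool.and_eq_true] at this
    exact_mod_cast beq_iff_eq.mp this.1
  · intro h3 r hr
    obtain ⟨p, hp, hp1⟩ := mem_of_mem_left_zip hlen' hr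
    have := hall' p hp
    rw [pvCC1, if_pos (by omega)] at this
    simp only [Bool.and_eq_true] at this
    obtain ⟨hl, hz⟩ := this
    have hl' : p.1.length = p.2.length := by exact_mod_cast beq_iff_eq.mp hl
    have hz' : p.1.zip p.2 = [] := by
      refine List.eq_nil_iff_forall_not_mem.mpr (fun q hq => ?_)
      have := List.all_eq_true.mp hz q hq
      simp [pvCC2] at this
      omega
    have : min p.1.length p.2.length = 0 := by
      have := congrArg List.length hz'
      simpa [List.length_zip] using this
    exact hp1 ▸ List.length_eq_zero_iff.mp (by omega)

-- the gate holds on D_-inputs with 2 ≤ axis, and A then returns a cons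
theorem catA_big_some (axis : Int) (h2 : 2 ≤ axis) (m1 m2 : List (List Int))
    (hne : ¬(m1 = [] ∧ m2 = []))
    (hlen : m1.length = m2.length) (hrow : ∀ p ∈ m1.zip m2, p.1.length = p.2.length)
    (hok : axis = 2 ∨ ∀ r ∈ m1, r = []) :
    ∃ l, cat_matrices m1 m2 axis = some l := by
  have hrc1 : ∀ p ∈ m1.zip m2, pvRC1 axis p.1 p.2
      = some ((p.1.zip p.2).map (fun q => q.1 + q.2)) := by
    intro p hp
    rw [pvRC1, if_neg (by omega), if_pos (by omega), if_neg (not_not.mpr (hrow p hp))]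
    rcases hok with h | h
    · exact pvZipRec_total_mem _ _ _ _ (fun q _ => by simp [pvRC2, h])
    · have h1 : p.1 = [] := h p.1 (List.of_mem_zip hp).1
      have h2' : p.2 = [] := List.length_eq_zero_iff.mp (by rw [← hrow p hp, h1]; rfl)
      simp [h1, h2', pvZipRec]
  have hcc1 : ∀ p ∈ m1.zip m2, pvCC1 axis p.1 p.2 = true := by
    intro p hp
    rw [pvCC1, if_pos (by omega)]
    simp only [Bool.and_eq_true]
    refine ⟨beq_iff_eq.mpr (by exact_mod_cast hrow p hp), List.all_eq_true.mpr (fun q hq => ?_)⟩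
    rcases hok with h | h
    · simp [pvCC2, h]
    · exact absurd hq (by simp [h p.1 (List.of_mem_zip hp).1])
  have hgate : pvCC0 axis m1 m2 = true := by
    rw [pvCC0, if_pos (by omega)]
    simp only [Bool.and_eq_true]
    exact ⟨beq_iff_eq.mpr (by exact_mod_cast hlen), List.all_eq_true.mpr hcc1⟩
  have hrc : pvRC0 axis m1 m2
      = some ((m1.zip m2).map (fun p => (p.1.zip p.2).map (fun q => q.1 + q.2))) := by
    rw [pvRC0, if_neg (by omega), if_pos (by omega), if_neg (not_not.mpr hlen)]
    exact pvZipRec_total_mem _ (fun (a b : List Int) => (a.zip b).map (fun q => q.1 + q.2)) _ _ hrc1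
  have hm1 : m1 ≠ [] := by
    rintro rfl
    exact hne ⟨rfl, List.length_eq_zero_iff.mp (by simpa using hlen.symm)⟩
  obtain ⟨x, xs, rfl⟩ := List.exists_cons_of_ne_nil hm1
  obtain ⟨y, ys, rfl⟩ := List.exists_cons_of_ne_nil
    (show m2 ≠ [] by rintro rfl; simp at hlen)
  rw [cat_matrices, if_pos hgate, hrc]
  exact ⟨_, rfl⟩

theorem catB_big_none (axis : Int) (h2 : 2 ≤ axis) (m1 m2 : List (List Int)) :
    cat_matrices_alt m1 m2 axis = none := by
  rw [cat_matrices_alt, if_neg (by omega), if_neg (by rintro ⟨h, -⟩; omega)]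

-- ===== VERDICT (by name: the statement is the Claim_ definition above) =====
theorem cat_matrices_spec : Claim_unchanged_cat_matrices := by
  intro mat1 mat2 axis _ hpre hnd
  obtain ⟨hax, hne⟩ := hpre
  by_cases h0 : axis = 0
  · subst h0; rw [catA_axis0 mat1 mat2 hne, cat_matrices_alt, if_pos rfl]
  by_cases h1 : axis = 1
  · subst h1
    rw [catA_axis1 mat1 mat2 hne]
    by_cases hlen : mat1.length = mat2.length
    · rw [if_pos hlen, cat_matrices_alt, if_neg (by norm_num), if_pos ⟨rfl, hlen⟩]
    · rw [if_neg hlen, cat_matrices_alt, if_neg (by norm_num),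
        if_neg (by rintro ⟨-, h⟩; exact hlen h)]
  -- 2 ≤ axis: outside D_, the gate must fail, so both sides are none
  have h2 : 2 ≤ axis := by omega
  rw [catB_big_none axis h2]
  by_cases hcc : pvCC0 axis mat1 mat2 = true
  · exfalso
    obtain ⟨hlen, hrow, hemp⟩ := gate_char axis h2 mat1 mat2 hcc
    refine hnd ⟨hlen, hrow, ?_⟩
    by_cases hA2 : axis = 2
    · exact Or.inl hA2
    · exact Or.inr ⟨by omega, hemp (by omega)⟩
  · rw [cat_matrices, if_neg hcc]

theorem cat_matrices_changed : Claim_changed_cat_matrices := by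
  unfold Claim_changed_cat_matrices; decide

theorem cat_matrices_tight : Claim_exact_cat_matrices := by
  intro mat1 mat2 axis _ hpre hd
  obtain ⟨hax, hne⟩ := hpre
  obtain ⟨hlen, hrow, hok⟩ := hd
  have h2 : 2 ≤ axis := by rcases hok with h | ⟨h, -⟩ <;> omega
  have hok' : axis = 2 ∨ ∀ r ∈ mat1, r = [] := by
    rcases hok with h | ⟨-, h⟩
    exacts [Or.inl h, Or.inr h]
  obtain ⟨l, hl⟩ := catA_big_some axis h2 mat1 mat2 hne hlen hrow hok'
  rw [hl, catB_big_none axis h2]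
  simp
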